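-- pv_equiv track=rewrite | github.com/jmrothberg/TRS-80-Simulator | TRS80_March_22_26.py | _wrap_not_ops
-- ===== SOURCE A (Python) =====
-- def _wrap_not_ops(expr):
--     """Replace 'not X' with '_bnot(X)' for TRS-80 bitwise NOT."""
--     while True:
--         in_quote = False
--         pos = -1
--         for i in range(len(expr)):
--             if expr[i] == '"':
--                 in_quote = not in_quote
--             elif not in_quote and expr[i:i + 4] == 'not ':
--                 if i == 0 or not expr[i - 1].isalpha():
--                     pos = i
--                     break
--         if pos == -1:
--             break
--         # Find operand start (skip 'not ' and spaces)
--         op_start = pos + 4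
--         while op_start < len(expr) and expr[op_start] == ' ':
--             op_start += 1
--         # Find operand end
--         depth = 0
--         j = op_start
--         if j < len(expr) and expr[j] == '(':
--             depth = 1
--             j += 1
--             while j < len(expr) and depth > 0:
--                 if expr[j] == '(':
--                     depth += 1
--                 elif expr[j] == ')':
--                     depth -= 1
--                 j += 1
--         else:
--             while j < len(expr):
--                 ch = expr[j]
--                 if ch == '(':
--                     depth += 1
--                 elif ch == ')':
--                     if depth > 0:
--                         depth -= 1
--                     else:
--                         break
--                 elif depth == 0:
--                     if expr[j:j + 5] == ' and ':
--                         break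
--                     if expr[j:j + 4] == ' or ':
--                         break
--                 j += 1
--         operand = expr[op_start:j]
--         expr = expr[:pos] + f"_bnot({operand})" + expr[j:]
--     return expr
-- ===== SOURCE B (Python) =====
-- def _wrap_not_ops(expr):
--     """Replace 'not X' with '_bnot(X)' for TRS-80 bitwise NOT."""
--     out = []
--     s = expr
--     i = 0
--     in_quote = False
--     while i < len(s):
--         c = s[i]
--         if c != '"' and not in_quote and s.startswith('not ', i) and (not out or not out[-1].isalpha()):
--             t = s[i + 4:].lstrip(' ')
--             # split t into operand and the rest (same operand grammar as before)
--             depth = 0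
--             k = 0
--             if t[:1] == '(':
--                 depth = 1
--                 k = 1
--                 while k < len(t) and depth > 0:
--                     if t[k] == '(':
--                         depth += 1
--                     elif t[k] == ')':
--                         depth -= 1
--                     k += 1
--             else:
--                 while k < len(t):
--                     ch = t[k]
--                     if ch == '(':
--                         depth += 1
--                     elif ch == ')':
--                         if depth > 0:
--                             depth -= 1
--                         else:
--                             break
--                     elif depth == 0:
--                         if t[k:k + 5] == ' and ' or t[k:k + 4] == ' or ':
--                             break
--                     k += 1
--             out.append('_bnot(')
--             # keep scanning inside the operand, the closing paren and the tail
--             s = t[:k] + ')' + t[k:]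
--             i = 0
--             in_quote = False
--         else:
--             if c == '"':
--                 in_quote = not in_quote
--             out.append(c)
--             i += 1
--     return ''.join(out)
-- ===== Notes on version B (the rewrite author's own statement) =====
-- stated objective: alternative
-- what changed: B replaces A's restart-from-index-0 outer while-loop (which rebuilds the whole string and rescans it after every replacement) with a single resumable left-to-right scan that emits output as it goes and, on a match, continues scanning inside the operand, the closing paren and the tail without rescanning the emitted prefix.
import Mathlib
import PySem

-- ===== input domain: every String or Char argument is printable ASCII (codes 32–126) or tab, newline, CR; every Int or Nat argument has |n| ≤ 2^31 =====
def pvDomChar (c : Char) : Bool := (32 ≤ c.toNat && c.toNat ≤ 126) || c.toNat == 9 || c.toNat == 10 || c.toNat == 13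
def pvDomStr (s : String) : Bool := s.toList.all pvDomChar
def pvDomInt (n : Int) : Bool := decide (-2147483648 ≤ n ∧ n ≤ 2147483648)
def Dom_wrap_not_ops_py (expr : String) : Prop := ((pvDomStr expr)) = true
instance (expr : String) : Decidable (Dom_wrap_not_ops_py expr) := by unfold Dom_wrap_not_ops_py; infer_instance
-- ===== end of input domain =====

-- B rewrites 'not X' to '_bnot(X)' in a single resumable scan that emits output as it goes,
-- instead of A's rebuild-the-string-and-restart-from-index-0 loop (objective: alternative).

-- ===== PORT A =====
-- A scans the whole string from index 0 for the first eligible 'not ' (quote-aware, not after a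
-- letter), splices in '_bnot(operand)', and restarts from scratch until no match remains.

def pvPat : List Char := ['n', 'o', 't', ' ']

-- for i in range(len(expr)): track in_quote, return first eligible match position
def aScan (l : List Char) (i : Nat) (inQuote : Bool) : Option Nat :=
  if h : i < l.length then
    if l[i] = '"' then aScan l (i + 1) (!inQuote)
    else if (!inQuote) && ((l.drop i).take 4 = pvPat) then
      if i = 0 || !(PySem.Chars.isalpha (l.getD (i - 1) ' ')) then some i
      else aScan l (i + 1) inQuote
    else aScan l (i + 1) inQuote
  else none
termination_by l.length - i
decreasing_by all_goals exact Nat.sub_succ_lt_self _ _ h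

-- while op_start < len(expr) and expr[op_start] == ' ': op_start += 1
def aSkipSpaces (l : List Char) (k : Nat) : Nat :=
  if h : k < l.length ∧ l.getD k ' ' = ' ' then aSkipSpaces l (k + 1) else k
termination_by l.length - k
decreasing_by exact Nat.sub_succ_lt_self _ _ h.1

-- parenthesised operand: while j < len(expr) and depth > 0
def aParen (l : List Char) (j : Nat) (depth : Nat) : Nat :=
  if h : j < l.length ∧ 0 < depth then
    if l.getD j ' ' = '(' then aParen l (j + 1) (depth + 1)
    else if l.getD j ' ' = ')' then aParen l (j + 1) (depth - 1)
    else aParen l (j + 1) depth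
  else j
termination_by l.length - j
decreasing_by all_goals exact Nat.sub_succ_lt_self _ _ h.1

-- plain operand: while j < len(expr) with the and/or/paren break rules
def aPlain (l : List Char) (j : Nat) (depth : Nat) : Nat :=
  if h : j < l.length then
    if l.getD j ' ' = '(' then aPlain l (j + 1) (depth + 1)
    else if l.getD j ' ' = ')' then
      if 0 < depth then aPlain l (j + 1) (depth - 1) else j
    else if depth = 0 ∧ (l.drop j).take 5 = [' ', 'a', 'n', 'd', ' '] then j
    else if depth = 0 ∧ (l.drop j).take 4 = [' ', 'o', 'r', ' '] then j
    else aPlain l (j + 1) depth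
  else j
termination_by l.length - j
decreasing_by all_goals exact Nat.sub_succ_lt_self _ _ h

def aFindJ (l : List Char) (opStart : Nat) : Nat :=
  if opStart < l.length ∧ l.getD opStart ' ' = '(' then aParen l (opStart + 1) 1
  else aPlain l opStart 0

-- termination measure for A's outer while-loop: number of 'not ' occurrences
def countNot : List Char → Nat
  | [] => 0
  | c :: cs => (if pvPat <+: (c :: cs) then 1 else 0) + countNot cs

-- ── lemmas cited by aLoop's decreasing_by (termination of the port itself) ──
lemma countNot_cons_ge (c : Char) (x : List Char) : countNot x ≤ countNot (c :: x) := by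
  rw [countNot]; split <;> omega

lemma countNot_append_ge (a b : List Char) : countNot a + countNot b ≤ countNot (a ++ b) := by
  induction a with
  | nil => simp [countNot]
  | cons x a ih =>
      simp only [List.cons_append]
      rw [countNot, countNot]
      by_cases hp : pvPat <+: x :: a
      · have hp2 : pvPat <+: x :: (a ++ b) := by
          obtain ⟨t, ht⟩ := hp
          exact ⟨t ++ b, by rw [← List.append_assoc, ht]; simp⟩
        rw [if_pos hp, if_pos hp2]; omega
      · rw [if_neg hp]; split <;> omega

lemma pat_prefix_elim {c : Char} (y b : List Char) (h : c ∉ pvPat) :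
    pvPat <+: (y ++ c :: b) ↔ pvPat <+: y := by
  constructor
  · intro hp
    by_cases hy : 4 ≤ y.length
    · have ht : pvPat = (y ++ c :: b).take 4 := by
        have := List.prefix_iff_eq_take.mp hp
        simpa [pvPat] using this
      rw [List.take_append_of_le_length hy] at ht
      exact ht ▸ List.take_prefix 4 y
    · exfalso
      obtain ⟨t, ht⟩ := hp
      have hget : (pvPat ++ t)[y.length]? = (y ++ c :: b)[y.length]? := by rw [ht]
      rw [List.getElem?_append_left (by simp [pvPat]; omega),
          List.getElem?_append_right (le_refl _)] at hget
      simp at hget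
      exact h (List.mem_of_getElem? hget)
  · intro hp
    exact hp.trans ⟨c :: b, rfl⟩

lemma countNot_split {c : Char} (a b : List Char) (h : c ∉ pvPat) :
    countNot (a ++ c :: b) = countNot a + countNot b := by
  induction a with
  | nil =>
      simp only [List.nil_append, countNot]
      have hnp : ¬ pvPat <+: c :: b := by
        intro hp
        have := (List.cons_prefix_cons.mp (by simpa [pvPat] using hp)).1
        exact h (by simp [pvPat, ← this])
      rw [if_neg hnp]
  | cons x a ih =>
      simp only [List.cons_append]
      rw [countNot, ih, countNot]
      have hiff : pvPat <+: x :: (a ++ c :: b) ↔ pvPat <+: x :: a := by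
        have := pat_prefix_elim (c := c) (x :: a) b h
        simpa using this
      rw [if_congr hiff rfl rfl]
      omega

lemma countNot_decrease (pre mid op rest : List Char) :
    countNot (pre ++ '_' :: 'b' :: 'n' :: 'o' :: 't' :: '(' :: (op ++ ')' :: rest)) <
      countNot (pre ++ 'n' :: 'o' :: 't' :: ' ' :: (mid ++ (op ++ rest))) := by
  have hL : countNot (pre ++ '_' :: 'b' :: 'n' :: 'o' :: 't' :: '(' :: (op ++ ')' :: rest)) =
      countNot pre + (countNot op + countNot rest) := by
    rw [countNot_split pre ('b' :: 'n' :: 'o' :: 't' :: '(' :: (op ++ ')' :: rest)) (by decide)]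
    rw [show ('b' :: 'n' :: 'o' :: 't' :: '(' :: (op ++ ')' :: rest)) =
          [] ++ 'b' :: ('n' :: 'o' :: 't' :: '(' :: (op ++ ')' :: rest)) from rfl,
        countNot_split [] _ (by decide)]
    rw [show ('n' :: 'o' :: 't' :: '(' :: (op ++ ')' :: rest)) =
          ['n', 'o', 't'] ++ '(' :: (op ++ ')' :: rest) from rfl,
        countNot_split ['n', 'o', 't'] _ (by decide)]
    rw [countNot_split op rest (by decide)]
    have h0 : countNot [] = 0 := by rfl
    have h3 : countNot ['n', 'o', 't'] = 0 := by decide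
    omega
  have hR : countNot pre + (1 + (countNot op + countNot rest)) ≤
      countNot (pre ++ 'n' :: 'o' :: 't' :: ' ' :: (mid ++ (op ++ rest))) := by
    have h1 := countNot_append_ge pre ('n' :: 'o' :: 't' :: ' ' :: (mid ++ (op ++ rest)))
    have h2 : 1 + countNot ('o' :: 't' :: ' ' :: (mid ++ (op ++ rest))) ≤
        countNot ('n' :: 'o' :: 't' :: ' ' :: (mid ++ (op ++ rest))) := by
      conv_rhs => rw [countNot]
      rw [if_pos (show pvPat <+: 'n' :: 'o' :: 't' :: ' ' :: (mid ++ (op ++ rest)) from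
        ⟨mid ++ (op ++ rest), by simp [pvPat]⟩)]
    have h3 : countNot (mid ++ (op ++ rest)) ≤ countNot ('o' :: 't' :: ' ' :: (mid ++ (op ++ rest))) :=
      le_trans (countNot_cons_ge _ _) (le_trans (countNot_cons_ge _ _) (countNot_cons_ge _ _))
    have h4 := countNot_append_ge mid (op ++ rest)
    have h5 := countNot_append_ge op rest
    omega
  omega

lemma aScan_bounds (l : List Char) : ∀ i q pos, aScan l i q = some pos →
    i ≤ pos ∧ pos + 4 ≤ l.length ∧ (l.drop pos).take 4 = pvPat := by
  intro i q
  fun_induction aScan l i q with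
  | case1 i q hi hq ih =>
      intro pos h; obtain ⟨ha, hb, hc⟩ := ih pos h; exact ⟨by omega, hb, hc⟩
  | case2 i q hi hq hw hok =>
      intro pos h
      injection h with h; subst h
      simp only [Bool.and_eq_true, decide_eq_true_eq] at hw
      obtain ⟨-, hw⟩ := hw
      have h4 := congrArg List.length hw
      simp [pvPat] at h4
      exact ⟨le_refl _, by omega, hw⟩
  | case3 i q hi hq hw hok ih =>
      intro pos h; obtain ⟨ha, hb, hc⟩ := ih pos h; exact ⟨by omega, hb, hc⟩
  | case4 i q hi hq hw ih =>
      intro pos h; obtain ⟨ha, hb, hc⟩ := ih pos h; exact ⟨by omega, hb, hc⟩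
  | case5 i hi => intro pos h; exact absurd h (by simp)

lemma aSkipSpaces_ge (l : List Char) (k : Nat) : k ≤ aSkipSpaces l k := by
  fun_induction aSkipSpaces l k <;> omega

lemma aSkipSpaces_le (l : List Char) (k : Nat) (h : k ≤ l.length) : aSkipSpaces l k ≤ l.length := by
  fun_induction aSkipSpaces l k with
  | case1 k hk ih => exact ih (by omega)
  | case2 k hk => exact h

lemma aParen_ge (l : List Char) : ∀ j d, j ≤ aParen l j d := by
  intro j d
  fun_induction aParen l j d <;> omega

lemma aParen_le (l : List Char) : ∀ j d, j ≤ l.length → aParen l j d ≤ l.length := by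
  intro j d
  fun_induction aParen l j d <;> intro h2 <;>
    first
    | assumption
    | (rename_i ih; exact ih (by omega))

lemma aPlain_ge (l : List Char) : ∀ j d, j ≤ aPlain l j d := by
  intro j d
  fun_induction aPlain l j d <;> omega

lemma aPlain_le (l : List Char) : ∀ j d, j ≤ l.length → aPlain l j d ≤ l.length := by
  intro j d
  fun_induction aPlain l j d <;> intro h2 <;>
    first
    | assumption
    | (rename_i ih; exact ih (by omega))

lemma aFindJ_ge (l : List Char) (k : Nat) : k ≤ aFindJ l k := by
  unfold aFindJ
  split
  · exact le_trans (by omega) (aParen_ge l (k + 1) 1)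
  · exact aPlain_ge l k 0

lemma aFindJ_le (l : List Char) (k : Nat) (h : k ≤ l.length) : aFindJ l k ≤ l.length := by
  unfold aFindJ
  split
  · rename_i hc; exact aParen_le l (k + 1) 1 (by omega)
  · exact aPlain_le l k 0 h

lemma aLoop_measure_lt (l : List Char) (pos : Nat) (h : aScan l 0 false = some pos) :
    countNot (l.take pos ++
        '_' :: 'b' :: 'n' :: 'o' :: 't' :: '(' ::
          ((l.drop (aSkipSpaces l (pos + 4))).take (aFindJ l (aSkipSpaces l (pos + 4)) - aSkipSpaces l (pos + 4)) ++
            ')' :: l.drop (aFindJ l (aSkipSpaces l (pos + 4))))) < countNot l := by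
  obtain ⟨-, hp4, hw⟩ := aScan_bounds l 0 false pos h
  set opS := aSkipSpaces l (pos + 4) with hopS
  set j := aFindJ l opS with hj
  have h1 : pos + 4 ≤ opS := aSkipSpaces_ge l (pos + 4)
  have h2 : opS ≤ l.length := aSkipSpaces_le l (pos + 4) hp4
  have h3 : opS ≤ j := aFindJ_ge l opS
  have h4 : j ≤ l.length := aFindJ_le l opS h2
  have e2 : l.drop (pos + 4) = (l.drop (pos + 4)).take (opS - (pos + 4)) ++ l.drop opS := by
    conv_lhs => rw [← List.take_append_drop (opS - (pos + 4)) (l.drop (pos + 4))]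
    rw [List.drop_drop, show pos + 4 + (opS - (pos + 4)) = opS from by omega]
  have e3 : l.drop opS = (l.drop opS).take (j - opS) ++ l.drop j := by
    conv_lhs => rw [← List.take_append_drop (j - opS) (l.drop opS)]
    rw [List.drop_drop, show opS + (j - opS) = j from by omega]
  have e1 : l = l.take pos ++ 'n' :: 'o' :: 't' :: ' ' ::
      ((l.drop (pos + 4)).take (opS - (pos + 4)) ++
        ((l.drop opS).take (j - opS) ++ l.drop j)) := by
    conv_lhs => rw [← List.take_append_drop pos l]
    congr 1
    conv_lhs => rw [← List.take_append_drop 4 (l.drop pos)]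
    conv_lhs => rw [hw, List.drop_drop, e2, e3]
    simp [pvPat]
  calc countNot (l.take pos ++ '_' :: 'b' :: 'n' :: 'o' :: 't' :: '(' ::
          ((l.drop opS).take (j - opS) ++ ')' :: l.drop j))
      < countNot (l.take pos ++ 'n' :: 'o' :: 't' :: ' ' ::
          ((l.drop (pos + 4)).take (opS - (pos + 4)) ++
            ((l.drop opS).take (j - opS) ++ l.drop j))) := countNot_decrease _ _ _ _
    _ = countNot l := by rw [← e1]

-- the outer while-True loop of A
def aLoop (l : List Char) : List Char :=
  match hs : aScan l 0 false with
  | none => l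
  | some pos =>
      let opStart := aSkipSpaces l (pos + 4)
      let j := aFindJ l opStart
      let operand := (l.drop opStart).take (j - opStart)
      aLoop (l.take pos ++ '_' :: 'b' :: 'n' :: 'o' :: 't' :: '(' :: (operand ++ ')' :: l.drop j))
termination_by countNot l
decreasing_by exact aLoop_measure_lt l pos hs

def wrap_not_ops_py (expr : String) : String := String.ofList (aLoop expr.toList)

-- ===== PORT B =====
-- B walks the string once (quote state + previous emitted char); at an eligible 'not ' it emits
-- '_bnot(' and resumes scanning on the operand, the closing paren and the tail, never rescanning output.

-- operand split, parenthesised mode: count of consumed chars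
def bParen (t : List Char) (depth : Nat) : Nat :=
  match t with
  | [] => 0
  | c :: cs =>
      if depth = 0 then 0
      else 1 + bParen cs (if c = '(' then depth + 1 else if c = ')' then depth - 1 else depth)

-- operand split, plain mode
def bPlain (t : List Char) (depth : Nat) : Nat :=
  match t with
  | [] => 0
  | c :: cs =>
      if c = '(' then 1 + bPlain cs (depth + 1)
      else if c = ')' then
        if 0 < depth then 1 + bPlain cs (depth - 1) else 0
      else if depth = 0 ∧ ([' ', 'a', 'n', 'd', ' '].isPrefixOf (c :: cs) ∨ [' ', 'o', 'r', ' '].isPrefixOf (c :: cs)) then 0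
      else 1 + bPlain cs depth

def bSplitK (t : List Char) : Nat :=
  match t with
  | '(' :: cs => 1 + bParen cs 1
  | _ => bPlain t 0

def prevOkB : Option Char → Bool
  | none => true
  | some c => !PySem.Chars.isalpha c

-- cited by bGo's decreasing_by: the continuation after a match is strictly shorter
lemma bGo_dec (c : Char) (cs : List Char) (k : Nat) (hp : pvPat.isPrefixOf (c :: cs) = true) :
    (((cs.drop 3).dropWhile (fun x => decide (x = ' '))).take k ++
        ')' :: ((cs.drop 3).dropWhile (fun x => decide (x = ' '))).drop k).length <
      (c :: cs).length := by
  have h4 := List.IsPrefix.length_le (List.isPrefixOf_iff_prefix.mp hp)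
  have ht := List.length_dropWhile_le (p := fun x => decide (x = ' ')) (l := cs.drop 3)
  simp [pvPat] at h4 ht ⊢
  omega

def bGo (q : Bool) (prev : Option Char) (s : List Char) : List Char :=
  match s with
  | [] => []
  | c :: cs =>
      if c ≠ '"' ∧ q = false ∧ pvPat.isPrefixOf (c :: cs) = true ∧ prevOkB prev = true then
        let t := (cs.drop 3).dropWhile (· = ' ')
        let k := bSplitK t
        '_' :: 'b' :: 'n' :: 'o' :: 't' :: '(' :: bGo false (some '(') (t.take k ++ ')' :: t.drop k)
      else
        c :: bGo (if c = '"' then !q else q) (some c) cs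
termination_by s.length
decreasing_by
  · rename_i h
    obtain ⟨-, -, hp, -⟩ := h
    exact bGo_dec c cs _ hp
  · exact Nat.lt_succ_self _

def wrap_not_ops_py_alt (expr : String) : String := String.ofList (bGo false none expr.toList)

-- ===== PRECONDITION & SPEC =====
def Spec_wrap_not_ops_py (expr : String) (out : String) : Prop := out = wrap_not_ops_py_alt expr
instance (expr : String) (out : String) : Decidable (Spec_wrap_not_ops_py expr out) := by unfold Spec_wrap_not_ops_py; infer_instance

-- ===== CLAIM (what is proved, stated in full; the proofs are below) =====
def Claim_equal_wrap_not_ops_py : Prop := ∀ (expr : String), Dom_wrap_not_ops_py expr → Spec_wrap_not_ops_py expr (wrap_not_ops_py expr)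

-- ===== LEMMAS AND PROOFS =====

-- quote state after scanning a block of characters
def qAfter (q : Bool) (x : List Char) : Bool := x.foldl (fun q c => if c = '"' then !q else q) q

-- previous-character state after scanning a block
def prevAfter (prev : Option Char) (x : List Char) : Option Char :=
  match x.getLast? with
  | none => prev
  | some c => some c

-- the previous-character state of A's index scan at index i
def prevC (l : List Char) (i : Nat) : Option Char :=
  if i = 0 then none else some (l.getD (i - 1) ' ')

-- B's continuation after firing a match whose 'not ' starts at index pos of l
def bTop (l : List Char) (pos : Nat) : List Char :=
  let t := (l.drop (pos + 4)).dropWhile (· = ' ')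
  t.take (bSplitK t) ++ ')' :: t.drop (bSplitK t)

-- 'scanning x (with continuation s) from state (q, prev) never fires B's match branch'
def Walk : Bool → Option Char → List Char → List Char → Prop
  | _, _, [], _ => True
  | q, prev, c :: x, s =>
      ¬(c ≠ '"' ∧ q = false ∧ pvPat.isPrefixOf (c :: (x ++ s)) = true ∧ prevOkB prev = true) ∧
        Walk (if c = '"' then !q else q) (some c) x s

lemma prevAfter_cons (prev : Option Char) (c : Char) (x : List Char) :
    prevAfter prev (c :: x) = prevAfter (some c) x := by
  cases x with
  | nil => rfl
  | cons d y =>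
      unfold prevAfter
      rw [List.getLast?_cons_cons]
      cases hgl : (d :: y).getLast? with
      | none => simp at hgl
      | some a => rfl

lemma qAfter_cons (q : Bool) (c : Char) (x : List Char) :
    qAfter q (c :: x) = qAfter (if c = '"' then !q else q) x := by
  simp [qAfter]

lemma walk_bGo : ∀ (x s : List Char) (q : Bool) (prev : Option Char), Walk q prev x s →
    bGo q prev (x ++ s) = x ++ bGo (qAfter q x) (prevAfter prev x) s := by
  intro x
  induction x with
  | nil => intro s q prev _; simp [qAfter, prevAfter]
  | cons c x ih =>
      intro s q prev hw
      obtain ⟨hnm, hrest⟩ := hw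
      rw [List.cons_append, bGo, if_neg hnm, ih _ _ _ hrest, qAfter_cons, prevAfter_cons]
      rfl

lemma walk_append : ∀ (a b s : List Char) (q : Bool) (prev : Option Char),
    Walk q prev a (b ++ s) → Walk (qAfter q a) (prevAfter prev a) b s → Walk q prev (a ++ b) s := by
  intro a
  induction a with
  | nil => intro b s q prev _ h2; simpa [qAfter, prevAfter] using h2
  | cons c a ih =>
      intro b s q prev h1 h2
      obtain ⟨hnm, hrest⟩ := h1
      refine ⟨by simpa [List.append_assoc] using hnm, ?_⟩
      rw [qAfter_cons, prevAfter_cons] at h2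
      exact ih b s _ _ hrest h2

lemma getD_lt (l : List Char) (i : Nat) (h : i < l.length) : l.getD i ' ' = l[i] :=
  List.getD_eq_getElem l ' ' h

lemma pat_isPrefix_iff (s : List Char) : pvPat.isPrefixOf s = true ↔ s.take 4 = pvPat := by
  rw [List.isPrefixOf_iff_prefix, List.prefix_iff_eq_take]
  constructor
  · intro h; exact h.symm
  · intro h; exact h.symm

lemma prevOkB_prevC (l : List Char) (i : Nat) :
    prevOkB (prevC l i) = (decide (i = 0) || !PySem.Chars.isalpha (l.getD (i - 1) ' ')) := by
  by_cases h : i = 0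
  · simp [prevC, prevOkB, h]
  · simp [prevC, prevOkB, h]

lemma drop_cons (l : List Char) (i : Nat) (h : i < l.length) :
    l.drop i = l[i] :: l.drop (i + 1) :=
  List.drop_eq_getElem_cons h

-- A's scanner finds nothing from i ⇒ B's scan copies the rest of the string verbatim
lemma aScan_none_bGo (l : List Char) : ∀ i q, aScan l i q = none →
    bGo q (prevC l i) (l.drop i) = l.drop i := by
  intro i q
  fun_induction aScan l i q with
  | case1 i q hi hq ih =>
      intro h
      have hp : prevC l (i + 1) = some l[i] := by
        unfold prevC
        rw [if_neg (Nat.succ_ne_zero i), Nat.add_sub_cancel, getD_lt l i hi]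
      rw [drop_cons l i hi, bGo, if_neg (by simp [hq]), if_pos hq, ← hp, ih h]
  | case2 i q hi hq hw hok => intro h; exact absurd h (by simp)
  | case3 i q hi hq hw hok ih =>
      intro h
      have hp : prevC l (i + 1) = some l[i] := by
        unfold prevC
        rw [if_neg (Nat.succ_ne_zero i), Nat.add_sub_cancel, getD_lt l i hi]
      rw [drop_cons l i hi, bGo, if_neg ?hc, if_neg hq, ← hp, ih h]
      case hc =>
        intro hcond
        have h1 := hcond.2.2.2
        rw [prevOkB_prevC] at h1
        exact hok h1
  | case4 i q hi hq hw ih =>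
      intro h
      have hp : prevC l (i + 1) = some l[i] := by
        unfold prevC
        rw [if_neg (Nat.succ_ne_zero i), Nat.add_sub_cancel, getD_lt l i hi]
      rw [drop_cons l i hi, bGo, if_neg ?hc, if_neg hq, ← hp, ih h]
      case hc =>
        intro hcond
        apply hw
        have hwt := (pat_isPrefix_iff (l.drop i)).mp (by rw [drop_cons l i hi]; exact hcond.2.2.1)
        simp [hcond.2.1, hwt]
  | case5 i q hi =>
      intro _
      rw [List.drop_eq_nil_of_le (by omega), bGo]

lemma isPrefixOf_iff_take (p s : List Char) : p.isPrefixOf s = true ↔ s.take p.length = p := by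
  rw [List.isPrefixOf_iff_prefix, List.prefix_iff_eq_take]
  exact eq_comm

lemma take_sub_cons (l : List Char) (i pos : Nat) (hi : i < l.length) (hlt : i < pos) :
    (l.drop i).take (pos - i) = l[i] :: (l.drop (i + 1)).take (pos - (i + 1)) := by
  rw [drop_cons l i hi, show pos - i = (pos - (i + 1)) + 1 from by omega, List.take_succ_cons]

-- quote/prev state accumulated by A's scan up to the match position
lemma aScan_some_state (l : List Char) : ∀ i q pos, aScan l i q = some pos →
    qAfter q ((l.drop i).take (pos - i)) = false ∧
      prevOkB (prevAfter (prevC l i) ((l.drop i).take (pos - i))) = true := by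
  intro i q
  fun_induction aScan l i q with
  | case1 i q hi hq ih =>
      intro pos h
      have hlt : i + 1 ≤ pos := (aScan_bounds l (i + 1) (!q) pos h).1
      have hp : prevC l (i + 1) = some l[i] := by
        unfold prevC
        rw [if_neg (Nat.succ_ne_zero i), Nat.add_sub_cancel, getD_lt l i hi]
      rw [take_sub_cons l i pos hi (by omega), qAfter_cons, prevAfter_cons, if_pos hq, ← hp]
      exact ih pos h
  | case2 i q hi hq hw hok =>
      intro pos h
      injection h with h; subst h
      simp only [Nat.sub_self, List.take_zero]
      simp only [Bool.and_eq_true] at hw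
      refine ⟨by simpa [qAfter] using hw.1, ?_⟩
      rw [show prevAfter (prevC l i) [] = prevC l i from rfl, prevOkB_prevC]
      exact hok
  | case3 i q hi hq hw hok ih =>
      intro pos h
      have hlt : i + 1 ≤ pos := (aScan_bounds l (i + 1) q pos h).1
      have hp : prevC l (i + 1) = some l[i] := by
        unfold prevC
        rw [if_neg (Nat.succ_ne_zero i), Nat.add_sub_cancel, getD_lt l i hi]
      rw [take_sub_cons l i pos hi (by omega), qAfter_cons, prevAfter_cons, if_neg hq, ← hp]
      exact ih pos h
  | case4 i q hi hq hw ih =>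
      intro pos h
      have hlt : i + 1 ≤ pos := (aScan_bounds l (i + 1) q pos h).1
      have hp : prevC l (i + 1) = some l[i] := by
        unfold prevC
        rw [if_neg (Nat.succ_ne_zero i), Nat.add_sub_cancel, getD_lt l i hi]
      rw [take_sub_cons l i pos hi (by omega), qAfter_cons, prevAfter_cons, if_neg hq, ← hp]
      exact ih pos h
  | case5 i q hi => intro pos h; exact absurd h (by simp)

-- A's scan up to the match never fires B's match branch, whatever follows a non-pattern char
lemma aScan_some_walk (l : List Char) : ∀ i q pos s, aScan l i q = some pos →
    Walk q (prevC l i) ((l.drop i).take (pos - i)) ('_' :: s) := by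
  intro i q
  fun_induction aScan l i q with
  | case1 i q hi hq ih =>
      intro pos s h
      have hlt : i + 1 ≤ pos := (aScan_bounds l (i + 1) (!q) pos h).1
      have hp : prevC l (i + 1) = some l[i] := by
        unfold prevC
        rw [if_neg (Nat.succ_ne_zero i), Nat.add_sub_cancel, getD_lt l i hi]
      rw [take_sub_cons l i pos hi (by omega)]
      exact ⟨by simp [hq], by rw [if_pos hq, ← hp]; exact ih pos s h⟩
  | case2 i q hi hq hw hok =>
      intro pos s h
      injection h with h; subst h
      simp only [Nat.sub_self, List.take_zero]
      exact trivial
  | case3 i q hi hq hw hok ih =>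
      intro pos s h
      have hlt : i + 1 ≤ pos := (aScan_bounds l (i + 1) q pos h).1
      have hp : prevC l (i + 1) = some l[i] := by
        unfold prevC
        rw [if_neg (Nat.succ_ne_zero i), Nat.add_sub_cancel, getD_lt l i hi]
      rw [take_sub_cons l i pos hi (by omega)]
      refine ⟨?_, by rw [if_neg hq, ← hp]; exact ih pos s h⟩
      intro hcond
      have h1 := hcond.2.2.2
      rw [prevOkB_prevC] at h1
      exact hok h1
  | case4 i q hi hq hw ih =>
      intro pos s h
      have hlt : i + 1 ≤ pos := (aScan_bounds l (i + 1) q pos h).1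
      have hp : prevC l (i + 1) = some l[i] := by
        unfold prevC
        rw [if_neg (Nat.succ_ne_zero i), Nat.add_sub_cancel, getD_lt l i hi]
      rw [take_sub_cons l i pos hi (by omega)]
      refine ⟨?_, by rw [if_neg hq, ← hp]; exact ih pos s h⟩
      intro hcond
      apply hw
      have hpre : pvPat <+: (l[i] :: ((l.drop (i + 1)).take (pos - (i + 1)) ++ '_' :: s)) :=
        List.isPrefixOf_iff_prefix.mp hcond.2.2.1
      have hpre2 : pvPat <+: (l[i] :: (l.drop (i + 1)).take (pos - (i + 1))) := by
        rw [show (l[i] :: ((l.drop (i + 1)).take (pos - (i + 1)) ++ '_' :: s)) =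
              (l[i] :: (l.drop (i + 1)).take (pos - (i + 1))) ++ '_' :: s from by simp] at hpre
        exact (pat_prefix_elim _ s (by decide)).mp hpre
      have hpre3 : pvPat <+: l.drop i := by
        rw [← take_sub_cons l i pos hi (by omega)] at hpre2
        exact hpre2.trans (List.take_prefix _ _)
      have hwt := (pat_isPrefix_iff (l.drop i)).mp (List.isPrefixOf_iff_prefix.mpr hpre3)
      simp [hcond.2.1, hwt]
  | case5 i q hi => intro pos s h; exact absurd h (by simp)

-- B on the unchanged string: copy up to the match, then fire the match branch
lemma aScan_some_bGo (l : List Char) : ∀ i q pos, aScan l i q = some pos →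
    bGo q (prevC l i) (l.drop i) = (l.drop i).take (pos - i) ++
      ('_' :: 'b' :: 'n' :: 'o' :: 't' :: '(' :: bGo false (some '(') (bTop l pos)) := by
  intro i q
  fun_induction aScan l i q with
  | case1 i q hi hq ih =>
      intro pos h
      have hlt : i + 1 ≤ pos := (aScan_bounds l (i + 1) (!q) pos h).1
      have hp : prevC l (i + 1) = some l[i] := by
        unfold prevC
        rw [if_neg (Nat.succ_ne_zero i), Nat.add_sub_cancel, getD_lt l i hi]
      rw [take_sub_cons l i pos hi (by omega), drop_cons l i hi, bGo,
        if_neg (by simp [hq]), if_pos hq, ← hp, ih pos h, List.cons_append]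
  | case2 i q hi hq hw hok =>
      intro pos h
      injection h with h; subst h
      simp only [Nat.sub_self, List.take_zero, List.nil_append]
      simp only [Bool.and_eq_true, Bool.not_eq_true', decide_eq_true_eq] at hw
      rw [drop_cons l i hi, bGo, if_pos ?hc]
      case hc =>
        refine ⟨hq, hw.1, ?_, ?_⟩
        · rw [← drop_cons l i hi]
          exact (pat_isPrefix_iff (l.drop i)).mpr hw.2
        · rw [prevOkB_prevC]; exact hok
      have ht : (l.drop (i + 1)).drop 3 = l.drop (i + 4) := by
        rw [List.drop_drop, show i + 1 + 3 = i + 4 from by omega]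
      simp only [bTop, ht]
  | case3 i q hi hq hw hok ih =>
      intro pos h
      have hlt : i + 1 ≤ pos := (aScan_bounds l (i + 1) q pos h).1
      have hp : prevC l (i + 1) = some l[i] := by
        unfold prevC
        rw [if_neg (Nat.succ_ne_zero i), Nat.add_sub_cancel, getD_lt l i hi]
      rw [take_sub_cons l i pos hi (by omega), drop_cons l i hi, bGo,
        if_neg ?hc, if_neg hq, ← hp, ih pos h, List.cons_append]
      case hc =>
        intro hcond
        have h1 := hcond.2.2.2
        rw [prevOkB_prevC] at h1
        exact hok h1
  | case4 i q hi hq hw ih =>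
      intro pos h
      have hlt : i + 1 ≤ pos := (aScan_bounds l (i + 1) q pos h).1
      have hp : prevC l (i + 1) = some l[i] := by
        unfold prevC
        rw [if_neg (Nat.succ_ne_zero i), Nat.add_sub_cancel, getD_lt l i hi]
      rw [take_sub_cons l i pos hi (by omega), drop_cons l i hi, bGo,
        if_neg ?hc, if_neg hq, ← hp, ih pos h, List.cons_append]
      case hc =>
        intro hcond
        apply hw
        have hwt := (pat_isPrefix_iff (l.drop i)).mp (by rw [drop_cons l i hi]; exact hcond.2.2.1)
        simp [hcond.2.1, hwt]
  | case5 i q hi => intro pos h; exact absurd h (by simp)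

-- A's space-skipping index loop versus B's lstrip
lemma skip_drop (l : List Char) : ∀ m, l.drop (aSkipSpaces l m) =
    (l.drop m).dropWhile (fun c => decide (c = ' ')) := by
  intro m
  fun_induction aSkipSpaces l m with
  | case1 m hm ih =>
      rw [ih, drop_cons l m hm.1, List.dropWhile_cons_of_pos
        (by simp only [decide_eq_true_eq]; rw [← getD_lt l m hm.1]; exact hm.2)]
  | case2 m hm =>
      by_cases hml : m < l.length
      · have hne : l.getD m ' ' ≠ ' ' := fun hc => hm ⟨hml, hc⟩
        rw [drop_cons l m hml,
          List.dropWhile_cons_of_neg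
            (by simp only [decide_eq_true_eq]; rw [← getD_lt l m hml]; exact hne)]
      · rw [List.drop_eq_nil_of_le (by omega)]
        rfl

lemma bParen_zero (t : List Char) : bParen t 0 = 0 := by
  cases t <;> simp [bParen]

-- A's index loop over a parenthesised operand versus B's consuming recursion
lemma paren_bridge (l : List Char) : ∀ j d, j ≤ l.length →
    aParen l j d = j + bParen (l.drop j) d := by
  intro j d
  fun_induction aParen l j d with
  | case1 j d h hc ih =>
      intro _
      rw [drop_cons l j h.1, bParen, if_neg (by omega), ← getD_lt l j h.1, hc,
        if_pos rfl, ih (by omega)]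
      omega
  | case2 j d h hc1 hc2 ih =>
      intro _
      rw [drop_cons l j h.1, bParen, if_neg (by omega), ← getD_lt l j h.1, hc2,
        if_neg (by decide), if_pos rfl, ih (by omega)]
      omega
  | case3 j d h hc1 hc2 ih =>
      intro _
      rw [drop_cons l j h.1, bParen, if_neg (by omega), ← getD_lt l j h.1,
        if_neg hc1, if_neg hc2, ih (by omega)]
      omega
  | case4 j d h =>
      intro hle
      rcases Decidable.not_and_iff_not_or_not.mp h with h1 | h2
      · rw [List.drop_eq_nil_of_le (by omega)]
        rfl
      · have hd : d = 0 := by omega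
        rw [hd, bParen_zero]
        omega

-- A's index loop over a plain operand versus B's consuming recursion
lemma plain_bridge (l : List Char) : ∀ j d, j ≤ l.length →
    aPlain l j d = j + bPlain (l.drop j) d := by
  intro j d
  fun_induction aPlain l j d with
  | case1 j d h hc ih =>
      intro _
      have hc' : l[j] = '(' := by rw [← getD_lt l j h]; exact hc
      rw [drop_cons l j h, bPlain, if_pos hc', ih (by omega)]
      omega
  | case2 j d h hc1 hc2 hd ih =>
      intro _
      have hc1' : ¬ l[j] = '(' := by rw [← getD_lt l j h]; exact hc1
      have hc2' : l[j] = ')' := by rw [← getD_lt l j h]; exact hc2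
      rw [drop_cons l j h, bPlain, if_neg hc1', if_pos hc2', if_pos hd, ih (by omega)]
      omega
  | case3 j d h hc1 hc2 hd =>
      intro _
      have hc1' : ¬ l[j] = '(' := by rw [← getD_lt l j h]; exact hc1
      have hc2' : l[j] = ')' := by rw [← getD_lt l j h]; exact hc2
      rw [drop_cons l j h, bPlain, if_neg hc1', if_pos hc2', if_neg hd]
      omega
  | case4 j d h hc1 hc2 hand =>
      intro _
      have hc1' : ¬ l[j] = '(' := by rw [← getD_lt l j h]; exact hc1
      have hc2' : ¬ l[j] = ')' := by rw [← getD_lt l j h]; exact hc2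
      rw [drop_cons l j h, bPlain, if_neg hc1', if_neg hc2',
        if_pos ⟨hand.1, Or.inl ((isPrefixOf_iff_take _ _).mpr
          (by rw [← drop_cons l j h]; exact hand.2))⟩]
      omega
  | case5 j d h hc1 hc2 hna hor =>
      intro _
      have hc1' : ¬ l[j] = '(' := by rw [← getD_lt l j h]; exact hc1
      have hc2' : ¬ l[j] = ')' := by rw [← getD_lt l j h]; exact hc2
      rw [drop_cons l j h, bPlain, if_neg hc1', if_neg hc2',
        if_pos ⟨hor.1, Or.inr ((isPrefixOf_iff_take _ _).mpr
          (by rw [← drop_cons l j h]; exact hor.2))⟩]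
      omega
  | case6 j d h hc1 hc2 hna hno ih =>
      intro _
      have hc1' : ¬ l[j] = '(' := by rw [← getD_lt l j h]; exact hc1
      have hc2' : ¬ l[j] = ')' := by rw [← getD_lt l j h]; exact hc2
      rw [drop_cons l j h, bPlain, if_neg hc1', if_neg hc2', if_neg ?hc, ih (by omega)]
      case hc =>
        rintro ⟨hd0, hAB⟩
        rcases hAB with hA | hA
        · rw [← drop_cons l j h] at hA
          exact hna ⟨hd0, (isPrefixOf_iff_take _ _).mp hA⟩
        · rw [← drop_cons l j h] at hA
          exact hno ⟨hd0, (isPrefixOf_iff_take _ _).mp hA⟩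
      omega
  | case7 j d h =>
      intro hle
      rw [List.drop_eq_nil_of_le (by omega)]
      rfl

lemma findJ_bridge (l : List Char) (k : Nat) (hk : k ≤ l.length) :
    aFindJ l k = k + bSplitK (l.drop k) := by
  unfold aFindJ
  split
  · rename_i hc
    have hc' : l[k] = '(' := by rw [← getD_lt l k hc.1]; exact hc.2
    rw [drop_cons l k hc.1, hc',
      show bSplitK ('(' :: l.drop (k + 1)) = 1 + bParen (l.drop (k + 1)) 1 from rfl,
      paren_bridge l (k + 1) 1 (by omega)]
    omega
  · rename_i hc
    rw [plain_bridge l k 0 hk]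
    congr 1
    by_cases hkl : k < l.length
    · have hc' : ¬ l[k] = '(' := fun he => hc ⟨hkl, by rw [getD_lt l k hkl]; exact he⟩
      rw [drop_cons l k hkl, bSplitK.eq_def]
      split
      · rename_i heq
        injection heq with h1 h2
        exact absurd h1 hc'
      · rfl
    · rw [List.drop_eq_nil_of_le (by omega)]
      rfl

lemma qAfter_append (q : Bool) (a b : List Char) : qAfter q (a ++ b) = qAfter (qAfter q a) b := by
  simp [qAfter]

lemma qAfter_wrapper (q : Bool) : qAfter q ['_', 'b', 'n', 'o', 't', '('] = q := by
  simp [qAfter]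

lemma prevAfter_append_wrapper (a : List Char) : ∀ prev : Option Char,
    prevAfter prev (a ++ ['_', 'b', 'n', 'o', 't', '(']) = some '(' := by
  induction a with
  | nil => intro prev; rfl
  | cons c x ih => intro prev; rw [List.cons_append, prevAfter_cons, ih]

lemma walk_wrapper (q : Bool) (prev : Option Char) (s : List Char) :
    Walk q prev ['_', 'b', 'n', 'o', 't', '('] s := by
  refine ⟨?_, ?_, ?_, ?_, ?_, ?_, trivial⟩ <;>
    (intro h; simp [pvPat, List.isPrefixOf] at h)

lemma aLoop_eq_bGo (l : List Char) : aLoop l = bGo false none l := by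
  fun_induction aLoop l with
  | case1 l hs =>
      have h := aScan_none_bGo l 0 false hs
      simp only [List.drop_zero] at h
      rw [show prevC l 0 = none from rfl] at h
      exact h.symm
  | case2 l pos hs opS0 j0 operand0 ih =>
      obtain ⟨-, hp4, hw⟩ := aScan_bounds l 0 false pos hs
      have ht : l.drop (aSkipSpaces l (pos + 4)) =
          (l.drop (pos + 4)).dropWhile (fun c => decide (c = ' ')) := skip_drop l (pos + 4)
      have hopLe : aSkipSpaces l (pos + 4) ≤ l.length := aSkipSpaces_le l (pos + 4) hp4
      have hjk : aFindJ l (aSkipSpaces l (pos + 4)) =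
          aSkipSpaces l (pos + 4) + bSplitK (l.drop (aSkipSpaces l (pos + 4))) :=
        findJ_bridge l _ hopLe
      set opS := aSkipSpaces l (pos + 4) with hopS
      set j := aFindJ l opS with hj
      have hexpr : (l.drop opS).take (j - opS) ++ ')' :: l.drop j = bTop l pos := by
        unfold bTop
        rw [← ht, show j - opS = bSplitK (l.drop opS) from by omega,
          show l.drop j = (l.drop opS).drop (bSplitK (l.drop opS)) from by
            rw [List.drop_drop, ← hjk]]
      rw [ih]
      show bGo false none (l.take pos ++ '_' :: 'b' :: 'n' :: 'o' :: 't' :: '(' ::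
          ((l.drop opS).take (j - opS) ++ ')' :: l.drop j)) = bGo false none l
      have hB : bGo false none l = l.take pos ++
          ('_' :: 'b' :: 'n' :: 'o' :: 't' :: '(' :: bGo false (some '(') (bTop l pos)) := by
        have := aScan_some_bGo l 0 false pos hs
        simpa [prevC] using this
      have hq0 : qAfter false (l.take pos) = false := by
        have := (aScan_some_state l 0 false pos hs).1
        simpa using this
      have hwalkpre : Walk false none (l.take pos)
          (['_', 'b', 'n', 'o', 't', '('] ++ bTop l pos) := by
        have := aScan_some_walk l 0 false pos ('b' :: 'n' :: 'o' :: 't' :: '(' :: bTop l pos) hs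
        simpa [prevC] using this
      have hwalk : Walk false none (l.take pos ++ ['_', 'b', 'n', 'o', 't', '(']) (bTop l pos) :=
        walk_append _ _ _ _ _ hwalkpre (walk_wrapper _ _ _)
      calc bGo false none (l.take pos ++ '_' :: 'b' :: 'n' :: 'o' :: 't' :: '(' ::
              ((l.drop opS).take (j - opS) ++ ')' :: l.drop j))
          = bGo false none ((l.take pos ++ ['_', 'b', 'n', 'o', 't', '(']) ++ bTop l pos) := by
            rw [← hexpr]; simp
        _ = (l.take pos ++ ['_', 'b', 'n', 'o', 't', '(']) ++
              bGo (qAfter false (l.take pos ++ ['_', 'b', 'n', 'o', 't', '(']))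
                (prevAfter none (l.take pos ++ ['_', 'b', 'n', 'o', 't', '(']))
                (bTop l pos) := walk_bGo _ _ _ _ hwalk
        _ = bGo false none l := by
            rw [qAfter_append, hq0, qAfter_wrapper, prevAfter_append_wrapper, hB]
            simp

-- ===== VERDICT (by name: the statement is the Claim_ definition above) =====
theorem wrap_not_ops_py_spec : Claim_equal_wrap_not_ops_py := by
  intro expr _
  unfold Spec_wrap_not_ops_py wrap_not_ops_py wrap_not_ops_py_alt
  rw [aLoop_eq_bGo]
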